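-- pv_equiv track=rewrite | github.com/kzinmr/mt-dnn | experiments/japanese/bccwj_utils.py | _remove_invalid_labels
-- ===== SOURCE A (Python) =====
-- def _is_valid(labels):
--     prev_bio, prev_netype, netype = '', '', ''
--     for l in labels:
--         if len(l.split('-')) == 2:
--             bio, netype = l.split('-')
--         else:
--             bio = l
--         # check two bad patterns like ['O', 'I-A', 'O'] or ['B-A', 'I-B', 'O']
--         if prev_bio in {'', 'O'} and bio == 'I' or prev_bio == 'B' and bio == 'I' and prev_netype != netype:
--             return False
--         prev_bio = bio
--         prev_netype = netype
--     return True
--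
-- def _remove_invalid_labels(labels):
--     if _is_valid(labels) or len(labels) == 0:
--         return labels
--
--     prev_bio, prev_netype, netype = '', '', ''
--     i = 0
--     remove_indices = []
--     seq_length = len(labels)
--     while i < seq_length:
--         l = labels[i]
--         if l == 'X':
--             i += 1
--             continue
--         if len(l.split('-')) == 2:
--             bio, netype = l.split('-')
--         else:
--             bio = l
--         # check two bad patterns like ['O', 'I-A', 'O'] or ['B-A', 'I-B', 'O']
--         if prev_bio in {'', 'O'} and bio == 'I' or prev_bio == 'B' and bio == 'I' and prev_netype != netype:
--             remove_from = i
--             j = i + 1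
--             while j < seq_length and labels[j].split('-')[0] == 'I':
--                 j += 1
--             remove_to = j
--             remove_indices.append((remove_from, remove_to))
--             i = j
--         else:
--             i += 1
--         prev_bio = bio
--         prev_netype = netype
--
--     for (rm_from, rm_to) in remove_indices:
--         labels[rm_from: rm_to] = ['O' for _ in range(rm_to - rm_from)]
--     return labels
-- ===== SOURCE B (Python) =====
-- # B: same left-to-right scan, but blanks bad runs in place with a boolean
-- # `removing` flag instead of collecting (from, to) index pairs and replacing
-- # them in a second loop; also collapses A's redundant netype/prev_netype pair
-- # (they are always equal between iterations) into one variable.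
-- # Like A, mutates `labels` in place and returns the same object.
--
-- def _is_valid(labels):
--     prev_bio, prev_netype, netype = '', '', ''
--     for l in labels:
--         if len(l.split('-')) == 2:
--             bio, netype = l.split('-')
--         else:
--             bio = l
--         if prev_bio in {'', 'O'} and bio == 'I' or prev_bio == 'B' and bio == 'I' and prev_netype != netype:
--             return False
--         prev_bio = bio
--         prev_netype = netype
--     return True
--
-- def _remove_invalid_labels(labels):
--     if _is_valid(labels):
--         return labels
--     prev_bio, prev_netype = '', ''
--     removing = False
--     for i, l in enumerate(labels):
--         if removing and l.split('-')[0] == 'I':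
--             labels[i] = 'O'
--             continue
--         removing = False
--         if l == 'X':
--             continue
--         parts = l.split('-')
--         if len(parts) == 2:
--             bio, netype = parts
--         else:
--             bio, netype = l, prev_netype
--         if (prev_bio in ('', 'O') and bio == 'I') or (prev_bio == 'B' and bio == 'I' and prev_netype != netype):
--             labels[i] = 'O'
--             removing = True
--         prev_bio, prev_netype = bio, netype
--     return labels
-- ===== Notes on version B (the rewrite author's own statement) =====
-- stated objective: simpler
-- what changed: Replaces A's collect-(from,to)-index-pairs scan with an inner while and a second replacement loop by a single for-loop that blanks bad runs in place via a boolean removing flag, and merges the always-equal netype/prev_netype variables into one.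
import Mathlib
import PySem

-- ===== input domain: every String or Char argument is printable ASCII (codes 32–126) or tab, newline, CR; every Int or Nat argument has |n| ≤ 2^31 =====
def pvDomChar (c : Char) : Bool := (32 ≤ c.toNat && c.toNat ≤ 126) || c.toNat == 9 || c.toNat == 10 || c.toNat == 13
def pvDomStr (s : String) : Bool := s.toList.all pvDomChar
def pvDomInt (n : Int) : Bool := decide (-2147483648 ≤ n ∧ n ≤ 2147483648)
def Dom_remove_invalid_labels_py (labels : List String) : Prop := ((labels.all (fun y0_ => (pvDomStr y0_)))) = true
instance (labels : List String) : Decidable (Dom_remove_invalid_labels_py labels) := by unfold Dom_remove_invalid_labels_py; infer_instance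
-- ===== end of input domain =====

-- B replaces A's collect-(from,to)-intervals scan (inner while + second replacement loop)
-- by a single pass that blanks bad runs directly via a boolean `removing` flag.
-- Both Pythons mutate `labels` in place and return the same object; the equivalence
-- proved here is about the returned value.

-- shared helpers (identical source lines in both Pythons): l.split('-') and the bad-pattern test
-- exact: the separator "-" is nonempty, so Python's split never raises; split? is always `some`
def pvSplit (s : String) : List String := (PySem.Str.split? s "-").getD [s]

def pvBad (prev_bio bio prev_netype netype : String) : Bool :=
  ((prev_bio == "" || prev_bio == "O") && bio == "I") ||
    (prev_bio == "B" && bio == "I" && prev_netype != netype)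

-- the shared two lines "if len(l.split('-')) == 2: bio, netype = l.split('-') else: bio = l"
-- (when there is no '-', Python keeps the previous value of netype)
def pvParse (l : String) (netype : String) : String × String :=
  let parts := pvSplit l
  (if parts.length == 2 then parts.getD 0 "" else l,
   if parts.length == 2 then parts.getD 1 "" else netype)

-- _is_valid, used verbatim by both Pythons
def isValidGo : List String → String → String → String → Bool
  | [], _, _, _ => true
  | l :: rest, prev_bio, prev_netype, netype =>
    let p := pvParse l netype
    if pvBad prev_bio p.1 prev_netype p.2 then false
    else isValidGo rest p.1 p.2 p.2

def pvIsValid (labels : List String) : Bool := isValidGo labels "" "" ""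

-- ===== PORT A =====
-- inner while: j advances while labels[j].split('-')[0] == 'I'
def iRunEnd (labels : List String) (j : Nat) : Nat :=
  if h : j < labels.length then
    if (pvSplit labels[j]).getD 0 "" == "I" then iRunEnd labels (j + 1) else j
  else j
termination_by labels.length - j

theorem iRunEnd_ge (labels : List String) (j : Nat) : j ≤ iRunEnd labels j := by
  unfold iRunEnd
  split
  · split
    · have := iRunEnd_ge labels (j + 1); omega
    · exact le_refl j
  · exact le_refl j
termination_by labels.length - j

-- the outer while loop of A: collects the (remove_from, remove_to) pairs
def scanA (labels : List String) (i : Nat) (prev_bio prev_netype netype : String) :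
    List (Nat × Nat) :=
  if h : i < labels.length then
    let l := labels[i]
    if l == "X" then scanA labels (i + 1) prev_bio prev_netype netype
    else
      let p := pvParse l netype
      if pvBad prev_bio p.1 prev_netype p.2 then
        let j := iRunEnd labels (i + 1)
        (i, j) :: scanA labels j p.1 p.2 p.2
      else
        scanA labels (i + 1) p.1 p.2 p.2
  else []
termination_by labels.length - i
decreasing_by
  · omega
  · have := iRunEnd_ge labels (i + 1); omega
  · omega

-- labels[f:t] = ['O' for _ in range(t-f)]  (exact: scanA only emits 0 ≤ f ≤ t ≤ len)
def applyOne (ls : List String) (ft : Nat × Nat) : List String :=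
  ls.take ft.1 ++ List.replicate (ft.2 - ft.1) "O" ++ ls.drop ft.2

def remove_invalid_labels_py (labels : List String) : List String :=
  if pvIsValid labels || labels.length == 0 then labels
  else (scanA labels 0 "" "" "").foldl applyOne labels

-- ===== PORT B =====
-- single pass with a `removing` flag; state: (removing, prev_bio, prev_netype)
def scanB : List String → Bool → String → String → List String
  | [], _, _, _ => []
  | l :: rest, removing, prev_bio, prev_netype =>
    if removing && (pvSplit l).getD 0 "" == "I" then
      "O" :: scanB rest true prev_bio prev_netype
    else if l == "X" then
      l :: scanB rest false prev_bio prev_netype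
    else
      let p := pvParse l prev_netype
      if pvBad prev_bio p.1 prev_netype p.2 then
        "O" :: scanB rest true p.1 p.2
      else
        l :: scanB rest false p.1 p.2

def remove_invalid_labels_py_alt (labels : List String) : List String :=
  if pvIsValid labels then labels else scanB labels false "" ""

-- ===== PRECONDITION & SPEC =====
def Spec_remove_invalid_labels_py (labels : List String) (out : List String) : Prop := out = remove_invalid_labels_py_alt labels
instance (labels : List String) (out : List String) : Decidable (Spec_remove_invalid_labels_py labels out) := by unfold Spec_remove_invalid_labels_py; infer_instance

-- ===== CLAIM (what is proved, stated in full; the proofs are below) =====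
def Claim_equal_remove_invalid_labels_py : Prop := ∀ (labels : List String), Dom_remove_invalid_labels_py labels → Spec_remove_invalid_labels_py labels (remove_invalid_labels_py labels)

-- ===== LEMMAS AND PROOFS =====

-- predicate of the inner while / of B's removal run
def isI (l : String) : Bool := (pvSplit l).getD 0 "" == "I"

-- length of the leading I-run
def runLen (xs : List String) : Nat := (xs.takeWhile isI).length

theorem iRunEnd_le (labels : List String) (j : Nat) (h : j ≤ labels.length) :
    iRunEnd labels j ≤ labels.length := by
  unfold iRunEnd
  split
  · split
    · exact iRunEnd_le labels (j + 1) (by omega)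
    · exact h
  · exact h
termination_by labels.length - j

-- iRunEnd counts exactly the leading I-run of the suffix
theorem iRunEnd_eq_runLen (labels : List String) (j : Nat) (h : j ≤ labels.length) :
    iRunEnd labels j = j + runLen (labels.drop j) := by
  unfold iRunEnd
  by_cases hj : j < labels.length
  · rw [List.drop_eq_getElem_cons hj]
    by_cases hI : isI labels[j]
    · simp only [hj, dif_pos, runLen]
      rw [List.takeWhile_cons_of_pos hI]
      have := iRunEnd_eq_runLen labels (j + 1) (by omega)
      simp only [isI] at hI
      rw [hI]
      simp only [if_true, this, runLen]
      simp only [List.length_cons]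
      omega
    · simp only [hj, dif_pos, runLen]
      rw [List.takeWhile_cons_of_neg hI]
      simp [isI] at hI
      simp [hI]
  · have hje : j = labels.length := by omega
    simp [hje, runLen]
termination_by labels.length - j

-- B's scan in removal mode blanks exactly the leading I-run
theorem scanB_removing (xs : List String) (pb pn : String) :
    scanB xs true pb pn =
      List.replicate (runLen xs) "O" ++ scanB (xs.drop (runLen xs)) false pb pn := by
  induction xs with
  | nil => simp [scanB, runLen]
  | cons l rest ih =>
    by_cases hI : isI l
    · have hrl : runLen (l :: rest) = runLen rest + 1 := by
        simp [runLen, List.takeWhile_cons_of_pos hI]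
      simp only [isI] at hI
      rw [scanB]
      simp only [hI, Bool.and_self, if_true, hrl]
      rw [ih]
      simp [List.replicate_succ]
    · have hrl : runLen (l :: rest) = 0 := by
        simp [runLen, List.takeWhile_cons_of_neg hI]
      simp [isI] at hI
      rw [hrl]
      simp only [List.replicate_zero, List.nil_append, List.drop_zero]
      rw [scanB, scanB]
      simp [hI]

-- main invariant: applying A's collected intervals from position i onward
-- yields B's single-pass output on the suffix
theorem main_inv (labels : List String) (k i : Nat) (pb pn : String) (ls : List String)
    (hk : labels.length - i ≤ k) (hi : i ≤ labels.length)
    (hlen : ls.length = labels.length) (hdrop : ls.drop i = labels.drop i) :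
    (scanA labels i pb pn pn).foldl applyOne ls =
      ls.take i ++ scanB (labels.drop i) false pb pn := by
  induction k generalizing i pb pn ls with
  | zero =>
    have hie : i = labels.length := by omega
    subst hie
    have h2 : ls.take labels.length = ls := by rw [← hlen]; exact List.take_length
    rw [scanA]
    simp [scanB, h2]
  | succ k ih =>
    by_cases hlt : i < labels.length
    · have hcons : labels.drop i = labels[i] :: labels.drop (i + 1) :=
        List.drop_eq_getElem_cons hlt
      have hlt' : i < ls.length := by omega
      have hcons' : ls.drop i = ls[i] :: ls.drop (i + 1) :=
        List.drop_eq_getElem_cons hlt'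
      have hget : ls[i] = labels[i] := by
        have := hdrop; rw [hcons, hcons'] at this; exact (List.cons.injEq _ _ _ _ ▸ this).1
      have hdrop1 : ls.drop (i + 1) = labels.drop (i + 1) := by
        have := hdrop; rw [hcons, hcons'] at this; exact (List.cons.injEq _ _ _ _ ▸ this).2
      have htake1 : ls.take (i + 1) = ls.take i ++ [labels[i]] := by
        rw [List.take_add_one]
        simp [List.getElem?_eq_getElem hlt', hget]
      rw [scanA]
      simp only [hlt, dif_pos]
      by_cases hX : labels[i] == "X"
      · have hXe : labels[i] = "X" := by simpa using hX
        simp only [hX, if_pos]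
        rw [ih (i + 1) pb pn ls (by omega) (by omega) hlen hdrop1]
        rw [hcons, scanB, htake1, hXe]
        simp
      · have hXf : (labels[i] == "X") = false := by simpa using hX
        rcases hp : pvParse labels[i] pn with ⟨bio, nety⟩
        simp only [hXf, Bool.false_eq_true, if_false]
        by_cases hbad : pvBad pb bio pn nety
        · simp only [hbad, if_true, List.foldl_cons]
          have hj1 : i + 1 ≤ iRunEnd labels (i + 1) := iRunEnd_ge labels (i + 1)
          have hj2 : iRunEnd labels (i + 1) ≤ labels.length := iRunEnd_le labels (i + 1) (by omega)
          have hjr : iRunEnd labels (i + 1) = i + 1 + runLen (labels.drop (i + 1)) :=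
            iRunEnd_eq_runLen labels (i + 1) (by omega)
          set j := iRunEnd labels (i + 1) with hj
          set r := runLen (labels.drop (i + 1)) with hr
          have hpre : (ls.take i ++ List.replicate (j - i) "O").length = j := by
            simp [List.length_take]; omega
          have hls'e : applyOne ls (i, j) = (ls.take i ++ List.replicate (j - i) "O") ++ ls.drop j := by
            simp [applyOne]
          have hdropj : ls.drop j = labels.drop j := by
            have h := congrArg (List.drop (j - i)) hdrop
            rw [List.drop_drop, List.drop_drop] at h
            rwa [show i + (j - i) = j from by omega] at h
          have hlen' : (applyOne ls (i, j)).length = labels.length := by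
            rw [hls'e, List.length_append, hpre]
            simp [List.length_drop]; omega
          have hdrop' : (applyOne ls (i, j)).drop j = labels.drop j := by
            rw [hls'e, List.drop_left' hpre, hdropj]
          have htakej : (applyOne ls (i, j)).take j = ls.take i ++ List.replicate (j - i) "O" := by
            rw [hls'e, List.take_left' hpre]
          rw [ih j bio nety (applyOne ls (i, j)) (by omega) hj2 hlen' hdrop']
          rw [htakej, hcons, scanB]
          simp only [Bool.false_and, Bool.false_eq_true, if_false, hXf, hp, hbad, if_true]
          rw [scanB_removing, ← hr, List.drop_drop,
            show i + 1 + r = j from by omega, show j - i = r + 1 from by omega]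
          simp [List.replicate_succ]
        · simp only [hbad, Bool.false_eq_true, if_false]
          rw [ih (i + 1) bio nety ls (by omega) (by omega) hlen hdrop1]
          rw [hcons, scanB, htake1]
          simp [hXf, hp, hbad]
    · have hie : i = labels.length := by omega
      subst hie
      have h2 : ls.take labels.length = ls := by rw [← hlen]; exact List.take_length
      rw [scanA]
      simp [scanB, h2]

-- ===== VERDICT (by name: the statement is the Claim_ definition above) =====
theorem remove_invalid_labels_py_spec : Claim_equal_remove_invalid_labels_py := by
  intro labels _
  unfold Spec_remove_invalid_labels_py remove_invalid_labels_py remove_invalid_labels_py_alt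
  by_cases hv : pvIsValid labels
  · simp [hv]
  · have hne : labels ≠ [] := by
      intro h; subst h; exact hv rfl
    have hvf : pvIsValid labels = false := by simpa using hv
    have hlen0 : (labels.length == 0) = false := by
      simp [List.length_eq_zero_iff, hne]
    have := main_inv labels labels.length 0 "" "" labels (by omega) (by omega) rfl rfl
    simp only [hvf, hlen0, Bool.false_or, Bool.false_eq_true, if_false]
    simpa using this
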